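-- pv_equiv track=rewrite | github.com/Yawn-Sean/Daily_CF_Problems | daily_problems/2025/06/0604/personal_submission/cf1210a_liryc.py | solve
-- ===== SOURCE A (Python) =====
-- def solve(n: int, m: int, edges: list[list[int]]) -> int:
--     if n <= 6 or m <= 6:
--         return m
--     ans = 0
--     for a, b in combinations(range(7), 2):
--         a, b = a + 1, b + 1
--         hs = set()
--         for u, v in edges:
--             u = a if u == b else u
--             v = a if v == b else v
--             if u > v:
--                 u, v = v, u
--             hs.add((u, v))
--         ans = max(ans, len(hs))
--     return ans
-- ===== SOURCE B (Python) =====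
-- def solve(n: int, m: int, edges: list[list[int]]) -> int:
--     if n <= 6 or m <= 6:
--         return m
--     # distinct normalized color-pairs
--     E = set()
--     for u, v in edges:
--         E.add((u, v) if u <= v else (v, u))
--     size = len(E)
--     best = 0
--     for a in range(1, 8):
--         for b in range(a + 1, 8):
--             # merging color b into a: count how many distinct pairs collapse together,
--             # instead of rebuilding the merged set.
--             loss = 0
--             for x in range(1, 8):
--                 if x != a and x != b:
--                     pa = (a, x) if a <= x else (x, a)
--                     pb = (b, x) if b <= x else (x, b)
--                     if pa in E and pb in E:
--                         loss += 1
--             c = ((a, a) in E) + ((a, b) in E) + ((b, b) in E)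
--             if c > 1:
--                 loss += c - 1
--             best = max(best, size - loss)
--     return best
-- ===== Notes on version B (the rewrite author's own statement) =====
-- stated objective: alternative
-- what changed: B replaces A's 21 rebuild-the-merged-set scans of all m edges by one dedup pass building the set E of distinct normalized color-pairs and then, for each of the 21 color merges, a purely arithmetic collision count: answer = |E| - (number of pairs that collapse together under the merge), computed from membership tests on E only; no merged set is ever built.
-- crash fix: Whenever n > 6 and m > 6 (every edge a 2-element list) A raises NameError because 'combinations' is never imported in its module; B returns the maximum distinct-pair count over the 21 color merges there. — e.g. on solve(7, 7, [[1,2],[2,3],[1,3],[3,4],[4,5],[5,6],[6,7]]): A raises NameError, B returns 7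
import Mathlib
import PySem

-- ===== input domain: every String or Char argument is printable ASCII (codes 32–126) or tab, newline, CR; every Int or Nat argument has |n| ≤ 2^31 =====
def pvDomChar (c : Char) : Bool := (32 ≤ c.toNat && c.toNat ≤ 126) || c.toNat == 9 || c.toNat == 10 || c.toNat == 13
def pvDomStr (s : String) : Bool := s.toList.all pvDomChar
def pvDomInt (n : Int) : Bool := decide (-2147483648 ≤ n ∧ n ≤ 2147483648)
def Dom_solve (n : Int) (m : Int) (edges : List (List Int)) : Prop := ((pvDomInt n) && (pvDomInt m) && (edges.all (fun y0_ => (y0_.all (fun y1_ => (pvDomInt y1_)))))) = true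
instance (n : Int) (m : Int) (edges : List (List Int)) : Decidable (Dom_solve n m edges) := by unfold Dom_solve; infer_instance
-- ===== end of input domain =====

-- B dedups the edges once into the set E of normalized color-pairs and answers each of the 21
-- merges by an arithmetic collision count (|E| minus collapsed pairs) instead of rebuilding a
-- merged set; past the guard the given A raises NameError ('combinations' never imported).

-- ===== PORT A =====
-- combinations(range(7), 2), written out as the literal list it denotes (in A's module this
-- name is unbound, so any input reaching the loop raises NameError: excluded by Pre_)
def pvCombs : List (Int × Int) :=
  [(0,1),(0,2),(0,3),(0,4),(0,5),(0,6),
   (1,2),(1,3),(1,4),(1,5),(1,6),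
   (2,3),(2,4),(2,5),(2,6),
   (3,4),(3,5),(3,6),
   (4,5),(4,6),
   (5,6)]

-- inner loop of A: 'for u, v in edges: … hs.add((u, v))' (an edge of length ≠ 2 raises ValueError)
def pvHsA (edges : List (List Int)) (a b : Int) : PySem.Set (Int × Int) :=
  edges.foldl (fun hs e =>
    match e with
    | [u0, v0] =>
      let u := if u0 == b then a else u0
      let v := if v0 == b then a else v0
      let uv := if u > v then (v, u) else (u, v)
      PySem.Set.add hs uv
    | _ => hs) PySem.Set.empty

def solve (n : Int) (m : Int) (edges : List (List Int)) : Int :=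
  if n ≤ 6 ∨ m ≤ 6 then m
  else
    pvCombs.foldl (fun ans ab =>
      max ans ((pvHsA edges (ab.1 + 1) (ab.2 + 1)).length : Int)) 0

-- ===== PORT B =====
-- one dedup pass: E = set of distinct normalized pairs
def pvE (edges : List (List Int)) : PySem.Set (Int × Int) :=
  edges.foldl (fun E e =>
    match e with
    | [u, v] => PySem.Set.add E (if u ≤ v then (u, v) else (v, u))
    | _ => E) PySem.Set.empty

-- collision count for merging color b into a: pairs of E that collapse together
def pvLoss (E : PySem.Set (Int × Int)) (a b : Int) : Int :=
  let loss :=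
    (PySem.List.pyRange 1 8 1).foldl (fun loss x =>
      if x ≠ a ∧ x ≠ b then
        let pa := if a ≤ x then (a, x) else (x, a)
        let pb := if b ≤ x then (b, x) else (x, b)
        if PySem.Set.contains E pa ∧ PySem.Set.contains E pb then loss + 1 else loss
      else loss) (0 : Int)
  let c : Int := (if PySem.Set.contains E (a, a) then 1 else 0)
               + (if PySem.Set.contains E (a, b) then 1 else 0)
               + (if PySem.Set.contains E (b, b) then 1 else 0)
  if c > 1 then loss + (c - 1) else loss

def solve_alt (n : Int) (m : Int) (edges : List (List Int)) : Int :=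
  if n ≤ 6 ∨ m ≤ 6 then m
  else
    let E := pvE edges
    let size : Int := PySem.Set.len E
    (PySem.List.pyRange 1 8 1).foldl (fun best a =>
      (PySem.List.pyRange (a + 1) 8 1).foldl (fun best b =>
        max best (size - pvLoss E a b)) best) 0

-- ===== PRECONDITION & SPEC =====
-- Pre_ is exactly where A returns: past the guard (n > 6 and m > 6) A's body evaluates the
-- unbound name 'combinations' (never imported in its module) and raises NameError.
def Pre_solve (n : Int) (m : Int) (edges : List (List Int)) : Prop :=
  n ≤ 6 ∨ m ≤ 6
instance (n : Int) (m : Int) (edges : List (List Int)) : Decidable (Pre_solve n m edges) := by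
  unfold Pre_solve; infer_instance

def pvWitness_solve : Int × Int × List (List Int) :=
  (6, 7, [[1,2],[2,3]])

-- On n > 6 and m > 6 with well-formed (length-2) edges, A raises NameError; B returns the answer.
def Raises_solve (n : Int) (m : Int) (edges : List (List Int)) : Prop :=
  6 < n ∧ 6 < m ∧ ∀ e ∈ edges, e.length = 2
instance (n : Int) (m : Int) (edges : List (List Int)) : Decidable (Raises_solve n m edges) := by
  unfold Raises_solve; infer_instance

def pvRaiseWitness_solve : Int × Int × List (List Int) :=
  (7, 7, [[1,2],[2,3],[1,3],[3,4],[4,5],[5,6],[6,7]])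
def pvRaiseWitnessOut_solve : Int := 7

def Spec_solve (n : Int) (m : Int) (edges : List (List Int)) (out : Int) : Prop := out = solve_alt n m edges
instance (n : Int) (m : Int) (edges : List (List Int)) (out : Int) : Decidable (Spec_solve n m edges out) := by unfold Spec_solve; infer_instance

-- ===== CLAIM (what is proved, stated in full; the proofs are below) =====
def Claim_equal_solve : Prop := ∀ (n : Int) (m : Int) (edges : List (List Int)), Dom_solve n m edges → Pre_solve n m edges → Spec_solve n m edges (solve n m edges)
def Claim_raises_solve : Prop := (∀ (n : Int) (m : Int) (edges : List (List Int)), Dom_solve n m edges → Raises_solve n m edges → ¬ Pre_solve n m edges) ∧ (Dom_solve (pvRaiseWitness_solve.1) (pvRaiseWitness_solve.2.1) (pvRaiseWitness_solve.2.2) ∧ Raises_solve (pvRaiseWitness_solve.1) (pvRaiseWitness_solve.2.1) (pvRaiseWitness_solve.2.2) ∧ solve_alt (pvRaiseWitness_solve.1) (pvRaiseWitness_solve.2.1) (pvRaiseWitness_solve.2.2) = pvRaiseWitnessOut_solve)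

-- ===== LEMMAS AND PROOFS =====

-- ===== VERDICT (by name: the statement is the Claim_ definition above) =====
theorem solve_spec : Claim_equal_solve := by
  intro n m edges _ hpre
  unfold Pre_solve at hpre
  unfold Spec_solve solve solve_alt
  simp [hpre]

set_option maxRecDepth 8192 in
@[simp] theorem solve_raises : Claim_raises_solve := by
  unfold Claim_raises_solve
  exact ⟨by
    intro n m edges _ hr hp
    obtain ⟨h1, h2, -⟩ := hr
    rcases hp with h | h <;> omega, by decide⟩
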